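-- pv_equiv track=rewrite | github.com/ProjectBA14/pm-internship-allocation-engine | backend/services/matching_service.py | _is_related_field
-- ===== SOURCE A (Python) =====
-- def _is_related_field(field: str, category: str) -> bool:
--     """Check if education field is related to internship category"""
--     field_category_mapping = {
--         'computer science': ['software development', 'data science'],
--         'information technology': ['software development', 'system administration'],
--         'marketing': ['digital marketing', 'social media'],
--         'business': ['finance', 'management', 'hr'],
--         'design': ['ui/ux', 'graphic design'],
--     }
--
--     for edu_field, categories in field_category_mapping.items():
--         if edu_field in field.lower() and category.lower() in categories:
--             return True
--
--     return False
-- ===== SOURCE B (Python) =====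
-- def _is_related_field(field: str, category: str) -> bool:
--     """Check if education field is related to internship category"""
--     fl = field.lower()
--     c = category.lower()
--     cs = 'computer science' in fl
--     it = 'information technology' in fl
--     mk = 'marketing' in fl
--     bz = 'business' in fl
--     dz = 'design' in fl
--     if c == 'software development':
--         return cs or it
--     if c == 'data science':
--         return cs
--     if c == 'system administration':
--         return it
--     if c == 'digital marketing' or c == 'social media':
--         return mk
--     if c == 'finance' or c == 'management' or c == 'hr':
--         return bz
--     if c == 'ui/ux' or c == 'graphic design':
--         return dz
--     return False
-- ===== Notes on version B (the rewrite author's own statement) =====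
-- stated objective: simpler
-- what changed: Replaces the loop over the field->categories dict (substring test plus list membership per entry) by straight-line code: five precomputed substring flags on the lowered field, then a branch chain on the lowered category that returns the relevant flag(s); no loop or dict at all.
import Mathlib
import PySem

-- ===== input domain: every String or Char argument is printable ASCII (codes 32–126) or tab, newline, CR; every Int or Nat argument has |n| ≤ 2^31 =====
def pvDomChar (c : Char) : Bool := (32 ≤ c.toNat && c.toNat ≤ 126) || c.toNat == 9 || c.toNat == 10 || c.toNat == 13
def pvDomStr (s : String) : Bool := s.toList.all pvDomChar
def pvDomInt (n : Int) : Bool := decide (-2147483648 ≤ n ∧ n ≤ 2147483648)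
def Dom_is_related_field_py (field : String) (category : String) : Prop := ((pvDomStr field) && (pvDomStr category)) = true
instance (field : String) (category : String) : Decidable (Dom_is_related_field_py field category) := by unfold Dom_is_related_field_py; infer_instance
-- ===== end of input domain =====

-- B replaces A's loop over the field->categories dict by loop-free straight-line code:
-- five substring flags on the lowered field, then a branch chain on the lowered category (simpler).

-- ===== PORT A =====
-- the dict literal; Python dict iteration order = insertion order = this list
def pvFieldCategoryMapping : List (String × List String) :=
  [("computer science", ["software development", "data science"]),
   ("information technology", ["software development", "system administration"]),
   ("marketing", ["digital marketing", "social media"]),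
   ("business", ["finance", "management", "hr"]),
   ("design", ["ui/ux", "graphic design"])]

-- the for-loop with early return over the dict items (List.any stops at the first hit)
def is_related_field_py (field : String) (category : String) : Bool :=
  pvFieldCategoryMapping.any (fun p =>
    PySem.Str.isIn p.1 (PySem.Str.lower field) && p.2.contains (PySem.Str.lower category))

-- ===== PORT B =====
def is_related_field_py_alt (field : String) (category : String) : Bool :=
  let fl := PySem.Str.lower field
  let c := PySem.Str.lower category
  let cs := PySem.Str.isIn "computer science" fl
  let it := PySem.Str.isIn "information technology" fl
  let mk := PySem.Str.isIn "marketing" fl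
  let bz := PySem.Str.isIn "business" fl
  let dz := PySem.Str.isIn "design" fl
  if c == "software development" then cs || it
  else if c == "data science" then cs
  else if c == "system administration" then it
  else if c == "digital marketing" || c == "social media" then mk
  else if c == "finance" || c == "management" || c == "hr" then bz
  else if c == "ui/ux" || c == "graphic design" then dz
  else false

-- ===== PRECONDITION & SPEC =====
def Spec_is_related_field_py (field : String) (category : String) (out : Bool) : Prop := out = is_related_field_py_alt field category
instance (field : String) (category : String) (out : Bool) : Decidable (Spec_is_related_field_py field category out) := by unfold Spec_is_related_field_py; infer_instance

-- ===== CLAIM (what is proved, stated in full; the proofs are below) =====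
def Claim_equal_is_related_field_py : Prop := ∀ (field : String) (category : String), Dom_is_related_field_py field category → Spec_is_related_field_py field category (is_related_field_py field category)

-- ===== LEMMAS AND PROOFS =====
theorem key_cases (c : String) :
    c = "software development" ∨ c = "data science" ∨ c = "system administration" ∨
    c = "digital marketing" ∨ c = "social media" ∨ c = "finance" ∨ c = "management" ∨
    c = "hr" ∨ c = "ui/ux" ∨ c = "graphic design" ∨
    (c ≠ "software development" ∧ c ≠ "data science" ∧ c ≠ "system administration" ∧
     c ≠ "digital marketing" ∧ c ≠ "social media" ∧ c ≠ "finance" ∧ c ≠ "management" ∧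
     c ≠ "hr" ∧ c ≠ "ui/ux" ∧ c ≠ "graphic design") := by
  by_cases h1 : c = "software development"; · exact Or.inl h1
  all_goals by_cases h2 : c = "data science"; · exact Or.inr (Or.inl h2)
  all_goals by_cases h3 : c = "system administration"; · tauto
  all_goals by_cases h4 : c = "digital marketing"; · tauto
  all_goals by_cases h5 : c = "social media"; · tauto
  all_goals by_cases h6 : c = "finance"; · tauto
  all_goals by_cases h7 : c = "management"; · tauto
  all_goals by_cases h8 : c = "hr"; · tauto
  all_goals by_cases h9 : c = "ui/ux"; · tauto
  all_goals by_cases h10 : c = "graphic design"; · tauto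
  all_goals tauto

-- ===== VERDICT (by name: the statement is the Claim_ definition above) =====
theorem is_related_field_py_spec : Claim_equal_is_related_field_py := by
  intro field category _
  unfold Spec_is_related_field_py is_related_field_py is_related_field_py_alt
  generalize PySem.Str.lower category = c
  rcases key_cases c with h|h|h|h|h|h|h|h|h|h|⟨h1,h2,h3,h4,h5,h6,h7,h8,h9,h10⟩
  case inr.inr.inr.inr.inr.inr.inr.inr.inr.inr =>
    simp [pvFieldCategoryMapping, h1, h2, h3, h4, h5, h6, h7, h8, h9, h10]
  all_goals subst h; simp [pvFieldCategoryMapping]
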